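-- pv_equiv track=rewrite | github.com/zzarbttoo/TMT | YJ/20200629_2_4.py | solution
-- ===== SOURCE A (Python) =====
-- import collections
--
-- def solution(progresses, speeds):
--
--     answer = []
--     progresses = collections.deque(progresses)
--     speeds = collections.deque(speeds)
--
--
--     while(progresses):
--         sum = 0
--         for i in range (0, len(progresses)):
--             if(progresses[i] < 100):
--                 progresses[i] += speeds[i]
--
--
--         while(progresses):
--             if progresses[0] >= 100:
--                 progresses.popleft()
--                 speeds.popleft()
--                 sum+=1
--             else:
--                 if(sum != 0):
--                     answer.append(sum)
--                 break
--     if (sum > 0):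
--         answer.append(sum)
--     return answer
-- ===== SOURCE B (Python) =====
-- def solution(progresses, speeds):
--     # O(n): days to finish per feature, then one sweep grouping by the running-max day.
--     answer = []
--     cur = 0      # release day of the current group's leader (running max)
--     count = 0    # size of the current group
--     for p, s in zip(progresses, speeds):
--         d = 1 if p >= 100 else -((p - 100) // s)
--         if d <= cur:
--             count += 1
--         else:
--             if count:
--                 answer.append(count)
--             cur = d
--             count = 1
--     if count:
--         answer.append(count)
--     return answer
-- ===== Notes on version B (the rewrite author's own statement) =====
-- stated objective: faster
-- what changed: replaces the day-by-day deque simulation (increment every unfinished feature each day, then pop finished ones) by a closed-form per-feature completion day ceil((100-p)/s) followed by a single sweep grouping features whose day does not exceed the running maximum; intended as faster (a timing run saw A time out where B returned, so no ratio was measured)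
import Mathlib
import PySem

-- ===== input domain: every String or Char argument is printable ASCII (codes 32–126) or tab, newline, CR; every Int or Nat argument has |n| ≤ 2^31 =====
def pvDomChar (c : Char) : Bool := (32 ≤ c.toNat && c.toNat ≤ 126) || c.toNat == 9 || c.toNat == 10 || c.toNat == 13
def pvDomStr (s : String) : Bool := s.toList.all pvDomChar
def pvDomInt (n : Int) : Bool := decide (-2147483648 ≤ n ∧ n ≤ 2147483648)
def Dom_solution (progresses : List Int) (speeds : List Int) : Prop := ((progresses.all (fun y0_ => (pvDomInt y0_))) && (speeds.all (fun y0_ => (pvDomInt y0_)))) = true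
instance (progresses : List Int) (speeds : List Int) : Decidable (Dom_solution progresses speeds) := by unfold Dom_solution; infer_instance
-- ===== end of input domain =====

-- B replaces A's day-by-day deque simulation by a closed-form completion day per feature plus a
-- single grouping sweep; intended as faster (a timing run could not measure a ratio: A timed
-- out on its generated inputs where B returned, so 'faster' is stated as intent, not measurement).
-- A mutates nothing observable (it copies its arguments into deques), so return-value equivalence is full equivalence.

-- ===== PORT A =====
-- 'for i in range(0, len(progresses)): if progresses[i] < 100: progresses[i] += speeds[i]'
-- (element-wise over both deques; when speeds is shorter Python raises IndexError there —
--  such inputs are outside Pre_solution, this port just keeps the remaining entries)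
def pvIncr : List Int → List Int → List Int
  | [], _ => []
  | p :: ps, s :: ss => (if p < 100 then p + s else p) :: pvIncr ps ss
  | p :: ps, [] => p :: pvIncr ps []

-- the inner 'while(progresses):' pop loop; returns (progresses, speeds, answer, sum)
def pvPop : List Int → List Int → List Int → Int → (List Int × List Int × List Int × Int)
  | [], ss, ans, k => ([], ss, ans, k)
  | p :: ps, ss, ans, k =>
    if p ≥ 100 then pvPop ps ss.tail ans (k + 1)
    else (p :: ps, ss, (if k ≠ 0 then ans ++ [k] else ans), k)

-- the outer 'while(progresses):' loop; fuel only makes recursion structural — the emptiness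
-- test is checked before fuel is consumed, and inside Dom ∧ Pre_ the fuel never runs out
def pvOuter (fuel : Nat) (prog speeds ans : List Int) (s : Int) : List Int :=
  if prog = [] then (if 0 < s then ans ++ [s] else ans)
  else match fuel with
    | 0 => ans
    | f + 1 =>
      let st := pvPop (pvIncr prog speeds) speeds ans 0
      pvOuter f st.1 st.2.1 st.2.2.1 st.2.2.2

def solution (progresses : List Int) (speeds : List Int) : List Int :=
  pvOuter 8589934592 progresses speeds [] 0

-- ===== PORT B =====
-- the body of Source B's for loop over zip(progresses, speeds); state = (answer, cur, count)
def pvStep (st : List Int × Int × Int) (pr : Int × Int) : List Int × Int × Int :=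
  match st, pr with
  | (answer, cur, count), (p, s) =>
    let d := if p ≥ 100 then 1 else -(PySem.Int.floordiv (p - 100) s)
    if d ≤ cur then (answer, cur, count + 1)
    else ((if count ≠ 0 then answer ++ [count] else answer), d, 1)

def solution_alt (progresses : List Int) (speeds : List Int) : List Int :=
  let st := (List.zip progresses speeds).foldl pvStep ([], 0, 0)
  if st.2.2 ≠ 0 then st.1 ++ [st.2.2] else st.1

-- ===== PRECONDITION & SPEC =====
-- Pre_ excludes exactly the inputs on which the Python A does not return: empty progresses
-- (UnboundLocalError on 'sum'), speeds shorter than progresses (IndexError on pop/index),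
-- and a non-positive speed for a feature below 100 (the outer loop never terminates).
def Pre_solution (progresses : List Int) (speeds : List Int) : Prop :=
  progresses ≠ [] ∧ progresses.length ≤ speeds.length ∧
    ∀ pr ∈ List.zip progresses speeds, pr.1 < 100 → 1 ≤ pr.2
instance (progresses : List Int) (speeds : List Int) : Decidable (Pre_solution progresses speeds) := by
  unfold Pre_solution; infer_instance
def pvWitness_solution : List Int × List Int := ([30, 99, 120], [30, 1, 5])

def Spec_solution (progresses : List Int) (speeds : List Int) (out : List Int) : Prop := out = solution_alt progresses speeds
instance (progresses : List Int) (speeds : List Int) (out : List Int) : Decidable (Spec_solution progresses speeds out) := by unfold Spec_solution; infer_instance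

-- ===== CLAIM (what is proved, stated in full; the proofs are below) =====
def Claim_equal_solution : Prop := ∀ (progresses : List Int) (speeds : List Int), Dom_solution progresses speeds → Pre_solution progresses speeds → Spec_solution progresses speeds (solution progresses speeds)

-- ===== LEMMAS AND PROOFS =====

-- day arithmetic: pvDv p s = ceil((100 - p)/s), the day feature (p,s) finishes (s > 0)
def pvDv (p s : Int) : Int := -(PySem.Int.floordiv (p - 100) s)

-- effective release day of a feature pair, exactly B's 'd'
def pvEday (pr : Int × Int) : Int :=
  if pr.1 ≥ 100 then 1 else -(PySem.Int.floordiv (pr.1 - 100) pr.2)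

-- one day of progress on a feature pair (A's increment step)
def pvInc1 (pr : Int × Int) : Int × Int :=
  (if pr.1 < 100 then pr.1 + pr.2 else pr.1, pr.2)

-- effect of one day on an effective day
def pvDec (e : Int) : Int := max 1 (e - 1)

-- recursion form of B's sweep, over the list of effective days
def pvSweepGo : List Int → Int → Int → List Int → List Int
  | [], _, count, ans => if count ≠ 0 then ans ++ [count] else ans
  | e :: rest, cur, count, ans =>
    if e ≤ cur then pvSweepGo rest cur (count + 1) ans
    else pvSweepGo rest e 1 (if count ≠ 0 then ans ++ [count] else ans)

lemma pvDv_add (p s : Int) (hs : 0 < s) : pvDv (p + s) s = pvDv p s - 1 := by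
  unfold pvDv
  rw [PySem.Int.floordiv_eq_ediv_of_pos hs, PySem.Int.floordiv_eq_ediv_of_pos hs]
  have h : p + s - 100 = (p - 100) + 1 * s := by ring
  rw [h, Int.add_mul_ediv_right _ _ (by omega : s ≠ 0)]
  omega

lemma pvDv_nonpos_iff (p s : Int) (hs : 0 < s) : pvDv p s ≤ 0 ↔ 100 ≤ p := by
  unfold pvDv
  rw [PySem.Int.floordiv_eq_ediv_of_pos hs]
  constructor
  · intro h
    by_contra hlt
    have : (p - 100) / s < 0 := Int.ediv_neg_of_neg_of_pos (by omega) hs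
    omega
  · intro h
    have : 0 ≤ (p - 100) / s := Int.ediv_nonneg (by omega) (by omega)
    omega

lemma pvDv_le (p s : Int) (hs : 0 < s) (hp : p < 100) : pvDv p s ≤ 100 - p := by
  have h1 : 1 ≤ pvDv p s := by have := (pvDv_nonpos_iff p s hs); omega
  have hbr := (PySem.Int.neg_floordiv_neg_eq_iff_of_pos (a := 100 - p) (b := s)
      (q := pvDv p s) hs).mp (by unfold pvDv; congr 1; congr 1; ring)
  have hmul : pvDv p s - 1 ≤ (pvDv p s - 1) * s := le_mul_of_one_le_right (by omega) (by omega)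
  omega

lemma pvEday_pos (pr : Int × Int) (hs : pr.1 < 100 → 1 ≤ pr.2) : 1 ≤ pvEday pr := by
  unfold pvEday
  split_ifs with h
  · omega
  · have := pvDv_nonpos_iff pr.1 pr.2 (by omega : (0:Int) < pr.2)
    unfold pvDv at this; omega

lemma pvEday_inc1 (pr : Int × Int) (hs : pr.1 < 100 → 1 ≤ pr.2) :
    pvEday (pvInc1 pr) = pvDec (pvEday pr) := by
  obtain ⟨p, s⟩ := pr
  by_cases hp : p < 100
  · have hs1 : (0:Int) < s := by have := hs hp; omega
    have hDp : 1 ≤ pvDv p s := by have := pvDv_nonpos_iff p s hs1; omega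
    have hadd := pvDv_add p s hs1
    have hinc : pvInc1 (p, s) = (p + s, s) := by simp [pvInc1, hp]
    rw [hinc]
    by_cases hdone : 100 ≤ p + s
    · have hD1 : pvDv (p + s) s ≤ 0 := (pvDv_nonpos_iff (p + s) s hs1).mpr hdone
      have he1 : pvEday (p + s, s) = 1 := by
        simp only [pvEday]; rw [if_pos (by omega : p + s ≥ 100)]
      have he0 : pvEday (p, s) = pvDv p s := by
        simp only [pvEday]; rw [if_neg (by omega : ¬ p ≥ 100)]; rfl
      rw [he1, he0]; unfold pvDec; omega
    · have hD1 : 1 ≤ pvDv (p + s) s := by have := pvDv_nonpos_iff (p + s) s hs1; omega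
      have he1 : pvEday (p + s, s) = pvDv (p + s) s := by
        simp only [pvEday]; rw [if_neg (by omega : ¬ p + s ≥ 100)]; rfl
      have he0 : pvEday (p, s) = pvDv p s := by
        simp only [pvEday]; rw [if_neg (by omega : ¬ p ≥ 100)]; rfl
      rw [he1, he0]; unfold pvDec; omega
  · have hinc : pvInc1 (p, s) = (p, s) := by simp [pvInc1, hp]
    rw [hinc]
    have he : pvEday (p, s) = 1 := by
      simp only [pvEday]; rw [if_pos (by omega : p ≥ 100)]
    rw [he]; unfold pvDec; omega

lemma pvPopped_iff (pr : Int × Int) (hs : pr.1 < 100 → 1 ≤ pr.2) :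
    (100 ≤ (pvInc1 pr).1 ↔ pvEday pr = 1) := by
  obtain ⟨p, s⟩ := pr
  by_cases hp : p < 100
  · have hs1 : (0:Int) < s := by have := hs hp; omega
    have hDp : 1 ≤ pvDv p s := by have := pvDv_nonpos_iff p s hs1; omega
    have hadd := pvDv_add p s hs1
    have hiff := pvDv_nonpos_iff (p + s) s hs1
    have hinc : (pvInc1 (p, s)).1 = p + s := by simp [pvInc1, hp]
    have he0 : pvEday (p, s) = pvDv p s := by
        simp only [pvEday]; rw [if_neg (by omega : ¬ p ≥ 100)]; rfl
    rw [hinc, he0]; omega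
  · have hinc : (pvInc1 (p, s)).1 = p := by simp [pvInc1, hp]
    have he : pvEday (p, s) = 1 := by
      simp only [pvEday]; rw [if_pos (by omega : p ≥ 100)]
    rw [hinc, he]; omega

-- list glue
lemma pvIncr_zip (ps ss : List Int) (h : ps.length ≤ ss.length) :
    List.zip (pvIncr ps ss) ss = (List.zip ps ss).map pvInc1 := by
  induction ps generalizing ss with
  | nil => simp [pvIncr]
  | cons p ps ih =>
    cases ss with
    | nil => simp at h
    | cons s ss => simp [pvIncr, pvInc1, List.zip_cons_cons, ih ss (by simpa using h)]

lemma pvIncr_length (ps ss : List Int) : (pvIncr ps ss).length = ps.length := by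
  induction ps generalizing ss with
  | nil => simp [pvIncr]
  | cons p ps ih => cases ss <;> simp [pvIncr, ih]

lemma pvZip_drop {α β : Type} (n : Nat) (l₁ : List α) (l₂ : List β) :
    List.zip (l₁.drop n) (l₂.drop n) = (List.zip l₁ l₂).drop n := by
  induction n generalizing l₁ l₂ with
  | zero => simp
  | succ n ih =>
    cases l₁ with
    | nil => simp
    | cons a l₁ =>
      cases l₂ with
      | nil => simp
      | cons b l₂ => simpa [List.zip_cons_cons] using ih l₁ l₂

lemma pvDropWhile_eq_drop {α : Type} (p : α → Bool) (l : List α) :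
    l.dropWhile p = l.drop (l.takeWhile p).length := by
  have h := List.drop_left (l₁ := l.takeWhile p) (l₂ := l.dropWhile p)
  rw [List.takeWhile_append_dropWhile] at h
  exact h.symm

lemma pvTakeWhile_congr {α : Type} (p q : α → Bool) (l : List α)
    (h : ∀ x ∈ l, p x = q x) : l.takeWhile p = l.takeWhile q := by
  induction l with
  | nil => rfl
  | cons a l ih =>
    have ha := h a (by simp)
    simp only [List.takeWhile_cons, ha]
    split
    · rw [ih (fun x hx => h x (by simp [hx]))]
    · rfl

lemma pvDropWhile_congr {α : Type} (p q : α → Bool) (l : List α)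
    (h : ∀ x ∈ l, p x = q x) : l.dropWhile p = l.dropWhile q := by
  induction l with
  | nil => rfl
  | cons a l ih =>
    have ha := h a (by simp)
    simp only [List.dropWhile_cons, ha]
    split
    · exact ih (fun x hx => h x (by simp [hx]))
    · rfl

-- pvPop characterised by takeWhile / dropWhile
lemma pvPop_spec (prog ss ans : List Int) (k : Int) :
    pvPop prog ss ans k =
      (prog.dropWhile (fun p => decide (100 ≤ p)),
       ss.drop (prog.takeWhile (fun p => decide (100 ≤ p))).length,
       (if prog.dropWhile (fun p => decide (100 ≤ p)) = [] then ans
        else if k + (prog.takeWhile (fun p => decide (100 ≤ p))).length ≠ 0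
          then ans ++ [k + (prog.takeWhile (fun p => decide (100 ≤ p))).length] else ans),
       k + (prog.takeWhile (fun p => decide (100 ≤ p))).length) := by
  induction prog generalizing ss k with
  | nil => simp [pvPop]
  | cons p ps ih =>
    by_cases hp : 100 ≤ p
    · have : pvPop (p :: ps) ss ans k = pvPop ps ss.tail ans (k + 1) := by
        simp [pvPop, hp]
      rw [this, ih]
      simp only [List.takeWhile_cons, List.dropWhile_cons, decide_eq_true hp, List.length_cons,
        List.drop_tail]
      push_cast
      rw [show k + 1 + ((ps.takeWhile fun p => decide (100 ≤ p)).length : Int)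
          = k + (((ps.takeWhile fun p => decide (100 ≤ p)).length : Int) + 1) from by ring]
      simp only [List.length_cons]
      push_cast
      rfl
    · simp [pvPop, hp]

-- sweep lemmas
lemma pvSweepGo_acc (es : List Int) (cur count : Int) (ans : List Int) :
    pvSweepGo es cur count ans = ans ++ pvSweepGo es cur count [] := by
  induction es generalizing cur count ans with
  | nil => simp [pvSweepGo]; split <;> simp
  | cons e rest ih =>
    simp only [pvSweepGo]
    split
    · rw [ih, ih _ _ []]
    · rw [ih, ih _ _ (if count ≠ 0 then [] ++ [count] else [])]
      split <;> simp
lemma pvSweepGo_dec (es : List Int) (cur count : Int) (ans : List Int)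
    (hcur : 2 ≤ cur) (hes : ∀ e ∈ es, 1 ≤ e) :
    pvSweepGo (es.map pvDec) (cur - 1) count ans = pvSweepGo es cur count ans := by
  induction es generalizing cur count ans with
  | nil => rfl
  | cons e rest ih =>
    have he : 1 ≤ e := hes e (by simp)
    have hrest : ∀ x ∈ rest, 1 ≤ x := fun x hx => hes x (by simp [hx])
    simp only [List.map_cons, pvSweepGo]
    by_cases h : e ≤ cur
    · have h2 : pvDec e ≤ cur - 1 := by unfold pvDec; omega
      rw [if_pos h2, if_pos h, ih cur _ _ hcur hrest]
    · have h2 : ¬ pvDec e ≤ cur - 1 := by unfold pvDec; omega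
      rw [if_neg h2, if_neg h]
      have : pvDec e = e - 1 := by unfold pvDec; omega
      rw [this, ih e _ _ (by omega) hrest]

lemma pvSweepGo_dec0 (e : Int) (rest : List Int) (he : 2 ≤ e)
    (hrest : ∀ x ∈ rest, 1 ≤ x) :
    pvSweepGo ((e :: rest).map pvDec) 0 0 [] = pvSweepGo (e :: rest) 0 0 [] := by
  have h1 : pvDec e = e - 1 := by unfold pvDec; omega
  simp only [List.map_cons, pvSweepGo, h1]
  rw [if_neg (by omega : ¬ e - 1 ≤ (0:Int)), if_neg (by omega : ¬ e ≤ (0:Int))]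
  simpa using pvSweepGo_dec rest e 1 [] he hrest

lemma pvSweepGo_ones (k : Nat) (rest : List Int) (count : Int) (ans : List Int) :
    pvSweepGo (List.replicate k 1 ++ rest) 1 count ans = pvSweepGo rest 1 (count + k) ans := by
  induction k generalizing count with
  | zero => simp
  | succ k ih =>
    simp only [List.replicate_succ, List.cons_append, pvSweepGo, if_pos (le_refl (1:Int))]
    rw [ih]
    congr 1
    push_cast
    ring

lemma pvSweep_replicate (k : Nat) (h : 1 ≤ k) :
    pvSweepGo (List.replicate k (1 : Int)) 0 0 [] = [(k : Int)] := by
  obtain ⟨k', rfl⟩ : ∃ k', k = k' + 1 := ⟨k - 1, by omega⟩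
  rw [List.replicate_succ]
  have h1 : pvSweepGo (1 :: List.replicate k' (1:Int)) 0 0 [] =
      pvSweepGo (List.replicate k' (1:Int) ++ []) 1 1 [] := by
    rw [pvSweepGo, if_neg (by omega : ¬ (1:Int) ≤ 0), if_neg (by omega : ¬ (0:Int) ≠ 0),
      List.append_nil]
  rw [h1, pvSweepGo_ones, pvSweepGo, if_pos (by push_cast; omega : (1:Int) + (k':Int) ≠ 0)]
  have h2 : (1:Int) + (k':Int) = ((k' + 1 : Nat) : Int) := by push_cast; ring
  rw [List.nil_append, h2]

lemma pvSweep_ones_prefix (k : Nat) (h : 1 ≤ k) (rest : List Int) :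
    pvSweepGo (List.replicate k (1 : Int) ++ rest) 0 0 [] = pvSweepGo rest 1 (k : Int) [] := by
  obtain ⟨k', rfl⟩ : ∃ k', k = k' + 1 := ⟨k - 1, by omega⟩
  rw [List.replicate_succ, List.cons_append]
  have h1 : pvSweepGo (1 :: (List.replicate k' (1:Int) ++ rest)) 0 0 [] =
      pvSweepGo (List.replicate k' (1:Int) ++ rest) 1 1 [] := by
    rw [pvSweepGo, if_neg (by omega : ¬ (1:Int) ≤ 0), if_neg (by omega : ¬ (0:Int) ≠ 0)]
  rw [h1, pvSweepGo_ones]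
  congr 1
  push_cast; ring

lemma pvOuter_nil (fuel : Nat) (ss ans : List Int) (s : Int) :
    pvOuter fuel [] ss ans s = if 0 < s then ans ++ [s] else ans := by
  cases fuel <;> rw [pvOuter] <;> simp

-- the outer loop of A computes the sweep of the effective days of the zipped state
lemma pvOuter_eq (f : Nat) (prog ss ans : List Int) (s : Int)
    (hne : prog ≠ []) (hlen : prog.length ≤ ss.length)
    (hpos : ∀ pr ∈ List.zip prog ss, pr.1 < 100 → 1 ≤ pr.2)
    (hf1 : 1 ≤ f)
    (hfuel : ∀ pr ∈ List.zip prog ss, (pvEday pr).toNat ≤ f) :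
    pvOuter f prog ss ans s = ans ++ pvSweepGo ((List.zip prog ss).map pvEday) 0 0 [] := by
  induction f generalizing prog ss ans s with
  | zero => omega
  | succ f ih =>
    have hstep : pvOuter (f + 1) prog ss ans s =
        (let st := pvPop (pvIncr prog ss) ss ans 0;
         pvOuter f st.1 st.2.1 st.2.2.1 st.2.2.2) := by
      rw [pvOuter]; rw [if_neg hne]
    rw [hstep, pvPop_spec]
    set m := List.zip prog ss with hm
    set G : Int × Int → Bool := fun pr => decide (pvEday pr = 1) with hG
    set prog₁ := pvIncr prog ss with hprog₁
    have hlen₁ : prog₁.length = prog.length := pvIncr_length prog ss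
    have hz : List.zip prog₁ ss = m.map pvInc1 := pvIncr_zip prog ss hlen
    have hfst : prog₁ = (m.map pvInc1).map Prod.fst := by
      rw [← hz, List.map_fst_zip (l₁ := prog₁) (l₂ := ss) (by omega)]
    have hmlen : m.length = prog.length := by
      rw [hm, List.length_zip]; omega
    have hmne : m ≠ [] := by
      intro h
      have : m.length = 0 := by rw [h]; rfl
      have : prog.length = 0 := by omega
      exact hne (List.length_eq_zero_iff.mp this)
    -- the pop predicate on incremented pairs equals G on the original pairs
    have hGW : ∀ pr ∈ m, decide (100 ≤ (pvInc1 pr).1) = G pr := by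
      intro pr hpr
      rw [hG]
      exact decide_eq_decide.mpr (pvPopped_iff pr (hpos pr hpr))
    -- translate takeWhile / dropWhile on prog₁ to takeWhile / dropWhile on m with G
    have htw : prog₁.takeWhile (fun p => decide (100 ≤ p)) = (m.takeWhile G).map (Prod.fst ∘ pvInc1) := by
      rw [hfst, List.takeWhile_map, List.takeWhile_map]
      rw [pvTakeWhile_congr (((fun p => decide (100 ≤ p)) ∘ Prod.fst) ∘ pvInc1) G m
        (fun pr h => hGW pr h), List.map_map]
    have hdw : prog₁.dropWhile (fun p => decide (100 ≤ p)) = (m.dropWhile G).map (Prod.fst ∘ pvInc1) := by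
      rw [hfst, List.dropWhile_map, List.dropWhile_map]
      rw [pvDropWhile_congr (((fun p => decide (100 ≤ p)) ∘ Prod.fst) ∘ pvInc1) G m
        (fun pr h => hGW pr h), List.map_map]
    set t := m.takeWhile G with ht
    set d := m.dropWhile G with hd
    set k : Nat := (prog₁.takeWhile (fun p => decide (100 ≤ p))).length with hk
    have hkt : k = t.length := by rw [hk, htw, List.length_map]
    have htd : t ++ d = m := List.takeWhile_append_dropWhile
    have htd_len : t.length + d.length = m.length := by
      rw [← htd]; simp
    -- the zipped state after the pops
    have hzip₂ : List.zip (prog₁.dropWhile (fun p => decide (100 ≤ p))) (ss.drop k) = d.map pvInc1 := by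
      have h1 : prog₁.dropWhile (fun p => decide (100 ≤ p)) = prog₁.drop k := by
        rw [pvDropWhile_eq_drop]
      rw [h1, pvZip_drop, hz]
      have h2 : m.map pvInc1 = (m.takeWhile G).map pvInc1 ++ (m.dropWhile G).map pvInc1 := by
        rw [← List.map_append, htd]
      have hlt : k = (t.map pvInc1).length := by simp [hkt]
      rw [h2, ← ht, ← hd, hlt, List.drop_left]
    -- all entries of t have effective day 1, so es starts with k ones
    have htones : t.map pvEday = List.replicate k (1 : Int) := by
      have : ∀ e ∈ t.map pvEday, e = 1 := by
        intro e he
        obtain ⟨pr, hpr, rfl⟩ := List.mem_map.mp he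
        have := List.mem_takeWhile_imp hpr
        rw [hG] at this
        simpa using this
      have h2 := List.eq_replicate_of_mem this
      rwa [List.length_map, ← hkt] at h2
    have hes : m.map pvEday = List.replicate k (1 : Int) ++ d.map pvEday := by
      rw [← htones, ← List.map_append, htd]
    -- effective days of the popped-and-incremented suffix
    have hdsub : ∀ pr ∈ d, pr ∈ m := fun pr hpr => (List.dropWhile_sublist G).subset hpr
    have hes₂ : (d.map pvInc1).map pvEday = (d.map pvEday).map pvDec := by
      rw [List.map_map, List.map_map]
      exact List.map_congr_left (fun pr hpr => pvEday_inc1 pr (hpos pr (hdsub pr hpr)))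
    have hdpos : ∀ e ∈ d.map pvEday, 1 ≤ e := by
      intro e he
      obtain ⟨pr, hpr, rfl⟩ := List.mem_map.mp he
      exact pvEday_pos pr (hpos pr (hdsub pr hpr))
    by_cases hdnil : d = []
    · -- everything popped: the outer loop exits and appends the final sum
      have htm : t = m := by rw [← htd, hdnil, List.append_nil]
      have hkm : k = m.length := by rw [hkt, htm]
      have hk1 : 1 ≤ k := by
        have : 0 < m.length := List.length_pos_iff.mpr hmne
        omega
      rw [hdw, hdnil]
      simp only [List.map_nil, if_true]
      rw [pvOuter_nil, if_pos (by push_cast; omega : (0:Int) < 0 + (k:Int))]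
      rw [hes, hdnil]
      simp only [List.map_nil, List.append_nil]
      rw [pvSweep_replicate k hk1]
      simp
    · -- some features remain: one appended group (if non-empty) and recurse
      obtain ⟨pr₂, dtl, hdd⟩ : ∃ pr₂ dtl, d = pr₂ :: dtl := by
        cases hd0 : d with
        | nil => exact absurd hd0 hdnil
        | cons a l => exact ⟨a, l, rfl⟩
      have hdd' : m.dropWhile G = pr₂ :: dtl := by rw [← hd]; exact hdd
      rw [hdd] at hdw hzip₂ hes hes₂ hdpos
      rw [hdw] at hzip₂
      have hdsub' : ∀ pr ∈ (pr₂ :: dtl), pr ∈ m := fun pr hpr => hdsub pr (by rw [hdd]; exact hpr)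
      have hG₂ : G pr₂ = false := by
        have h := List.head_dropWhile_not G (l := m) (by simp [hdd'])
        simpa [hdd'] using h
      have he₂pos : 1 ≤ pvEday pr₂ := pvEday_pos pr₂ (hpos pr₂ (hdsub' pr₂ (by simp)))
      have he₂ : 2 ≤ pvEday pr₂ := by
        rw [hG] at hG₂
        simp only [decide_eq_false_iff_not] at hG₂
        omega
      have hf1' : 1 ≤ f := by
        have := hfuel pr₂ (hdsub' pr₂ (by simp))
        have heg : pvEday pr₂ = pvEday pr₂ := rfl
        omega
      have hdwne : (pr₂ :: dtl).map (Prod.fst ∘ pvInc1) ≠ [] := by simp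
      have hdlen : (pr₂ :: dtl).length + k = m.length := by
        have h1 := htd_len
        rw [hdd] at h1
        omega
      have hlen₂ : ((pr₂ :: dtl).map (Prod.fst ∘ pvInc1)).length ≤ (ss.drop k).length := by
        simp only [List.length_map, List.length_drop]
        omega
      have hpos₂ : ∀ pr ∈ List.zip ((pr₂ :: dtl).map (Prod.fst ∘ pvInc1)) (ss.drop k),
          pr.1 < 100 → 1 ≤ pr.2 := by
        intro pr hpr
        rw [hzip₂] at hpr
        obtain ⟨pr₀, hpr₀, rfl⟩ := List.mem_map.mp hpr
        have h0 := hpos pr₀ (hdsub' pr₀ hpr₀)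
        obtain ⟨p, sp⟩ := pr₀
        by_cases hp : p < 100
        · intro _; simpa [pvInc1, hp] using h0 hp
        · intro hlt
          exfalso
          simp only [pvInc1] at hlt
          rw [if_neg hp] at hlt
          exact hp (by simpa using hlt)
      have hfuel₂ : ∀ pr ∈ List.zip ((pr₂ :: dtl).map (Prod.fst ∘ pvInc1)) (ss.drop k),
          (pvEday pr).toNat ≤ f := by
        intro pr hpr
        rw [hzip₂] at hpr
        obtain ⟨pr₀, hpr₀, rfl⟩ := List.mem_map.mp hpr
        have h0 := hfuel pr₀ (hdsub' pr₀ hpr₀)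
        rw [pvEday_inc1 pr₀ (hpos pr₀ (hdsub' pr₀ hpr₀))]
        unfold pvDec
        omega
      have hrec := ih ((pr₂ :: dtl).map (Prod.fst ∘ pvInc1)) (ss.drop k)
        (if (0:Int) + ↑k ≠ 0 then ans ++ [(0:Int) + ↑k] else ans) ((0:Int) + ↑k)
        (by simp) hlen₂ hpos₂ hf1' hfuel₂
      rw [hdw, if_neg hdwne, hrec, hzip₂, hes₂, hes]
      -- now a pure sweep computation
      by_cases hk0 : k = 0
      · rw [if_neg (by rw [hk0]; omega : ¬ ((0:Int) + (k:Nat) ≠ 0))]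
        rw [hk0]
        simp only [List.replicate_zero, List.nil_append]
        congr 1
        rw [show (pr₂ :: dtl).map pvEday = pvEday pr₂ :: dtl.map pvEday from rfl]
        rw [pvSweepGo_dec0 (pvEday pr₂) (dtl.map pvEday) he₂
          (fun x hx => hdpos x (by simp [hx]))]
      · rw [if_pos (by omega : ((0:Int) + (k:Nat) ≠ 0))]
        rw [pvSweep_ones_prefix k (by omega)]
        rw [show (pr₂ :: dtl).map pvEday = pvEday pr₂ :: dtl.map pvEday from rfl]
        rw [pvSweepGo]
        rw [if_neg (by omega : ¬ pvEday pr₂ ≤ 1), if_pos (by omega : ((k:Nat) : Int) ≠ 0)]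
        rw [pvSweepGo_acc]
        rw [pvSweepGo_dec0 (pvEday pr₂) (dtl.map pvEday) he₂
          (fun x hx => hdpos x (by simp [hx]))]
        rw [show pvSweepGo (pvEday pr₂ :: dtl.map pvEday) 0 0 [] =
            pvSweepGo (dtl.map pvEday) (pvEday pr₂) 1 [] from by
          rw [pvSweepGo]; rw [if_neg (by omega : ¬ pvEday pr₂ ≤ 0), if_neg (by omega : ¬ (0:Int) ≠ 0)]]
        rw [pvSweepGo_acc (dtl.map pvEday) (pvEday pr₂) 1 ([] ++ [(k:Int)])]
        simp [List.append_assoc]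

-- B's fold is the sweep
lemma pvAlt_eq_sweep (l : List (Int × Int)) (ans : List Int) (cur count : Int) :
    (let st := l.foldl pvStep (ans, cur, count);
     if st.2.2 ≠ 0 then st.1 ++ [st.2.2] else st.1) = pvSweepGo (l.map pvEday) cur count ans := by
  induction l generalizing ans cur count with
  | nil => rfl
  | cons pr rest ih =>
    simp only [List.foldl_cons, List.map_cons, pvSweepGo]
    have hstep : pvStep (ans, cur, count) pr =
        if pvEday pr ≤ cur then (ans, cur, count + 1)
        else ((if count ≠ 0 then ans ++ [count] else ans), pvEday pr, 1) := by
      cases pr with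
      | mk p s => simp [pvStep, pvEday]
    rw [hstep]
    split
    · exact ih ans cur (count + 1)
    · exact ih _ _ 1

-- ===== VERDICT (by name: the statement is the Claim_ definition above) =====
theorem solution_spec : Claim_equal_solution := by
  unfold Claim_equal_solution
  intro ps ss hdom hpre
  obtain ⟨hne, hlen, hpos⟩ := hpre
  unfold Spec_solution
  have hB := pvAlt_eq_sweep (List.zip ps ss) [] 0 0
  have hfuel : ∀ pr ∈ List.zip ps ss, (pvEday pr).toNat ≤ 8589934592 := by
    intro pr hpr
    have hmem := List.of_mem_zip hpr
    have hdom' : -2147483648 ≤ pr.1 ∧ pr.1 ≤ 2147483648 := by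
      unfold Dom_solution at hdom
      simp only [Bool.and_eq_true, List.all_eq_true] at hdom
      have := hdom.1 pr.1 hmem.1
      simpa [pvDomInt] using this
    by_cases hp : pr.1 ≥ 100
    · have h1 : pvEday pr = 1 := by simp only [pvEday]; rw [if_pos hp]
      rw [h1]
      omega
    · have hs1 : (0:Int) < pr.2 := by have := hpos pr hpr (by omega); omega
      have he : pvEday pr = pvDv pr.1 pr.2 := by
        simp only [pvEday]; rw [if_neg hp]; rfl
      have hle := pvDv_le pr.1 pr.2 hs1 (by omega)
      rw [he]; omega
  have hA := pvOuter_eq 8589934592 ps ss [] 0 hne hlen hpos (by omega) hfuel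
  show solution ps ss = solution_alt ps ss
  calc solution ps ss = pvOuter 8589934592 ps ss [] 0 := rfl
    _ = [] ++ pvSweepGo ((List.zip ps ss).map pvEday) 0 0 [] := hA
    _ = solution_alt ps ss := by rw [List.nil_append, ← hB]; rfl
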